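-- pv_equiv track=rewrite | github.com/PMinn/Simple-Mail-Client | code/module/headerParser.py | parseHeaderFromStr
-- ===== SOURCE A (Python) =====
-- def parseHeaderFromStr(reply):
--     line = reply.split("\r\n")
--     lastKey = ''
--     response = {}
--     body = ''
--     isInHeader = True
--     bodyLine = 0
--     bodyStartIndex = 0
--     for i in range(1, len(line)):
--         if isInHeader:
--             if line[i] == "":
--                 isInHeader = False
--                 bodyStartIndex = i + 1
--             elif line[i][0] != '\t':
--                 key = line[i].split(': ')[0]
--                 value = line[i].split(key+': ')[1]
--                 response[key] = value
--                 lastKey = key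
--             else:
--                 response[lastKey] += line[i]
--         else:
--             body += line[i]
--             bodyLine += 1
--             if i != len(line)-3:
--                 body += '\n'
--     return response, body, bodyLine
-- ===== SOURCE B (Python) =====
-- def parseHeaderFromStr(reply):
--     lines = reply.split("\r\n")
--     n = len(lines)
--     # locate the header/body boundary first: the first empty line after the status line
--     try:
--         blank = lines.index("", 1)
--     except ValueError:
--         blank = n
--     # header pass: only the lines strictly between the status line and the blank line
--     response = {}
--     lastKey = ''
--     for raw in lines[1:blank]:
--         if raw[0] != '\t':
--             key = raw.split(': ')[0]
--             response[key] = raw.split(key + ': ')[1]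
--             lastKey = key
--         else:
--             response[lastKey] += raw
--     # body pass: each remaining line followed by '\n', except the third-from-last
--     # line of the whole reply (the last payload line of a "\r\n.\r\n"-ended reply)
--     tail = lines[blank + 1:]
--     k = len(tail)
--     body = ''.join(tail[i] + ('\n' if i != k - 3 else '') for i in range(k))
--     return response, body, k
-- ===== Notes on version B (the rewrite author's own statement) =====
-- stated objective: simpler
-- what changed: B first locates the header/body boundary with list.index, then parses the header block and builds the body in two separate passes (header loop over the slice values, body as a join over local indices, line count by length), instead of A's single index loop with isInHeader/bodyStartIndex/bodyLine state; Pre_ excludes only inputs where both programs raise (a header line lacking the colon-space separator, or a tab-continuation line before any key line).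
import Mathlib
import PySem

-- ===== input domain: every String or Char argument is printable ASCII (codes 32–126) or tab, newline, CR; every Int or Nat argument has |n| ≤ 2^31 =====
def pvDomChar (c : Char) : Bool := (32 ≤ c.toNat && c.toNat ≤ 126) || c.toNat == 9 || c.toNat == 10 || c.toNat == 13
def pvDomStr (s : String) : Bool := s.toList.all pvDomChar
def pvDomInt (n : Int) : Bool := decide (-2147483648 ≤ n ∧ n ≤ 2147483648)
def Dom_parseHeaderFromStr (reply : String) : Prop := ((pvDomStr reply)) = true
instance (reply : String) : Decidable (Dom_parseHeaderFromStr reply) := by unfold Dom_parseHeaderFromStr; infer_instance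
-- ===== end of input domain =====

-- B locates the header/body boundary first and then parses header and body in two
-- separate passes (simpler decomposition); A's single stateful index loop is port A.


-- ===== PORT A =====
structure StA where
  lastKey : String
  response : PySem.Dict String String
  body : String
  isInHeader : Bool
  bodyLine : Int
  bodyStartIndex : Int
  deriving Repr, DecidableEq

-- one iteration of A's 'for i in range(1, len(line))' loop (n = len(line));
-- 'line[i].split(key+': ')[1]' raises IndexError when absent: totalized with .getD "",
-- excluded by Pre_; likewise 'response[lastKey] +=' (KeyError) is totalized with getD "".
def stepA (n : Int) (st : StA) (p : Int × String) : StA :=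
  let i := p.1
  let cur := p.2
  if st.isInHeader then
    if cur == "" then
      { st with isInHeader := false, bodyStartIndex := i + 1 }
    else if ((PySem.Str.pyGet? cur 0).getD ' ') != '\t' then
      let key := PySem.List.pyGetD ((PySem.Str.split? cur ": ").getD []) 0 ""
      let value := (PySem.List.pyGet? ((PySem.Str.split? cur (key ++ ": ")).getD []) 1).getD ""
      { st with response := st.response.insert key value, lastKey := key }
    else
      { st with response := st.response.insert st.lastKey
                  ((st.response.get? st.lastKey).getD "" ++ cur) }
  else
    let body1 := st.body ++ cur
    let body2 := if i ≠ n - 3 then body1 ++ "\n" else body1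
    { st with body := body2, bodyLine := st.bodyLine + 1 }

def parseHeaderFromStr (reply : String) : (List (String × String)) × String × Int :=
  let line := (PySem.Str.split? reply "\r\n").getD []
  let n : Int := line.length
  let st := (PySem.List.pyRange 1 n 1).foldl
    (fun st i => stepA n st (i, PySem.List.pyGetD line i "")) ⟨"", PySem.Dict.empty, "", true, 0, 0⟩
  (st.response.items, st.body, st.bodyLine)

-- ===== PORT B =====
-- one iteration of B's header loop over lines[1:blank]; same totalization as in A's port
def stepH (st : String × PySem.Dict String String) (raw : String) : String × PySem.Dict String String :=
  if ((PySem.Str.pyGet? raw 0).getD ' ') != '\t' then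
    let key := PySem.List.pyGetD ((PySem.Str.split? raw ": ").getD []) 0 ""
    let value := (PySem.List.pyGet? ((PySem.Str.split? raw (key ++ ": ")).getD []) 1).getD ""
    (key, st.2.insert key value)
  else
    (st.1, st.2.insert st.1 ((st.2.get? st.1).getD "" ++ raw))

def parseHeaderFromStr_alt (reply : String) : (List (String × String)) × String × Int :=
  let lines := (PySem.Str.split? reply "\r\n").getD []
  let n := lines.length
  -- 'lines.index("", 1)' = first "" at position ≥ 1, else (ValueError) blank = n
  let blank : Nat := match PySem.List.index? (lines.drop 1) "" with
    | some j => j + 1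
    | none => n
  let hst := (PySem.List.slice lines (some (1:Int)) (some (blank : Int))).foldl stepH ("", PySem.Dict.empty)
  let tail := PySem.List.slice lines (some ((blank : Int) + 1)) none
  let k := tail.length
  let body := PySem.Str.join ""
    ((PySem.List.pyRange 0 k 1).map
      (fun i => PySem.List.pyGetD tail i "" ++ (if i ≠ (k : Int) - 3 then "\n" else "")))
  (hst.2.items, body, (k : Int))

-- ===== PRECONDITION & SPEC =====
-- the header block: the lines after the status line and before the first empty line
def pvHdr (reply : String) : List String :=
  let t := ((PySem.Str.split? reply "\r\n").getD []).drop 1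
  t.take ((PySem.List.index? t "").getD t.length)

-- Pre_ excludes exactly the inputs on which A raises: a non-tab header line lacking the
-- colon-space separator (IndexError on split(...)[1]) or a header block starting with a tab line
-- (KeyError on response[lastKey]); B raises on exactly the same inputs.
def Pre_parseHeaderFromStr (reply : String) : Prop :=
  (∀ x ∈ pvHdr reply, PySem.Str.startswith x "\t" = true ∨ PySem.Str.isIn ": " x = true) ∧
  (∀ x ∈ (pvHdr reply).take 1, PySem.Str.startswith x "\t" = false)
instance (reply : String) : Decidable (Pre_parseHeaderFromStr reply) := by
  unfold Pre_parseHeaderFromStr; infer_instance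

def pvWitness_parseHeaderFromStr : String := "S\r\nKey: v\r\n\r\nbody\r\n.\r\n"

def Spec_parseHeaderFromStr (reply : String) (out : (List (String × String)) × String × Int) : Prop :=
  out = parseHeaderFromStr_alt reply
instance (reply : String) (out : (List (String × String)) × String × Int) :
    Decidable (Spec_parseHeaderFromStr reply out) := by unfold Spec_parseHeaderFromStr; infer_instance

-- ===== CLAIM (what is proved, stated in full; the proofs are below) =====
def Claim_equal_parseHeaderFromStr : Prop := ∀ (reply : String), Dom_parseHeaderFromStr reply →
  Pre_parseHeaderFromStr reply → Spec_parseHeaderFromStr reply (parseHeaderFromStr reply)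


-- ===== LEMMAS AND PROOFS =====

-- concatenation of a list of strings (proof-side helper)
def strConcat (l : List String) : String := l.foldl (· ++ ·) ""

lemma foldl_append_str (l : List String) : ∀ (a : String), l.foldl (· ++ ·) a = a ++ strConcat l := by
  induction l with
  | nil => intro a; simp [strConcat]
  | cons x xs ih =>
    intro a
    have hc : strConcat (x :: xs) = x ++ strConcat xs := by
      show List.foldl (· ++ ·) "" (x :: xs) = _
      rw [List.foldl_cons, ih ("" ++ x)]
      simp
    rw [List.foldl_cons, ih (a ++ x), hc, String.append_assoc]

lemma strConcat_cons (x : String) (l : List String) : strConcat (x :: l) = x ++ strConcat l := by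
  simpa using foldl_append_str l x

lemma join_empty (l : List String) : PySem.Str.join "" l = strConcat l := by
  induction l with
  | nil =>
    have h0 : strConcat [] = "" := rfl
    rw [h0, ← String.toList_inj, PySem.Str.toList_join, List.map_nil, PySem.Chars.join_nil]
    simp
  | cons x xs ih =>
    rw [strConcat_cons, ← ih, ← String.toList_inj, PySem.Str.toList_join, String.toList_append,
      PySem.Str.toList_join]
    cases xs with
    | nil => simp [PySem.Chars.join_singleton, PySem.Chars.join_nil]
    | cons y ys => simp [PySem.Chars.join_cons_cons]

-- an index loop 'for i in range(a, len(L))' reading L[i] is a fold over enumerate(L[a:], a)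
lemma foldl_idx_enum {α β : Type} (L : List α) (d : α) (f : β → Int × α → β) (a : Nat) (init : β) :
    (PySem.List.pyRange (a : Int) (L.length : Int) 1).foldl
      (fun s i => f s (i, PySem.List.pyGetD L i d)) init
      = (PySem.List.enumerate (L.drop a) (a : Int)).foldl f init := by
  by_cases h : a < L.length
  · have h1 : PySem.List.pyGetD L ((a : Nat) : Int) d = L[a] := by
      rw [PySem.List.pyGetD_natCast]
      exact List.getD_eq_getElem L d h
    rw [PySem.List.pyRange_one_cons (by exact_mod_cast h), List.drop_eq_getElem_cons h,
      PySem.List.enumerate_cons, List.foldl_cons, List.foldl_cons, h1]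
    have hcast : ((a : Int) + 1) = ((a + 1 : Nat) : Int) := by push_cast; ring
    rw [hcast]
    exact foldl_idx_enum L d f (a + 1) _
  · rw [PySem.List.pyRange_one_eq_nil (by exact_mod_cast Nat.le_of_not_lt h),
      List.drop_eq_nil_of_le (Nat.le_of_not_lt h)]
    simp
termination_by L.length - a

-- in header mode, on a nonempty line, A's step is B's header step (other fields unchanged)
lemma stepA_header (n : Int) (i : Int) (x : String) (hx : x ≠ "") (k : String)
    (r : PySem.Dict String String) (b : String) (bl bs : Int) :
    stepA n ⟨k, r, b, true, bl, bs⟩ (i, x)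
      = ⟨(stepH (k, r) x).1, (stepH (k, r) x).2, b, true, bl, bs⟩ := by
  simp only [stepA, stepH]
  simp [hx]
  split <;> rfl

lemma headerFold (n : Int) (h : List String) (hne : ∀ x ∈ h, x ≠ "") :
    ∀ (i0 : Int) (k : String) (r : PySem.Dict String String) (b : String) (bl bs : Int),
    (PySem.List.enumerate h i0).foldl (stepA n) ⟨k, r, b, true, bl, bs⟩
      = ⟨(h.foldl stepH (k, r)).1, (h.foldl stepH (k, r)).2, b, true, bl, bs⟩ := by
  induction h with
  | nil => intro i0 k r b bl bs; simp [PySem.List.enumerate_nil]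
  | cons x xs ih =>
    intro i0 k r b bl bs
    rw [PySem.List.enumerate_cons, List.foldl_cons,
      stepA_header n i0 x (hne x (List.mem_cons_self)) k r b bl bs, List.foldl_cons,
      ih (fun y hy => hne y (List.mem_cons_of_mem x hy))]

-- in body mode A's loop appends chunks and counts lines
lemma bodyFold (n : Int) (h : List String) :
    ∀ (i0 : Int) (k : String) (r : PySem.Dict String String) (b : String) (bl bs : Int),
    (PySem.List.enumerate h i0).foldl (stepA n) ⟨k, r, b, false, bl, bs⟩
      = ⟨k, r,
          b ++ strConcat ((PySem.List.enumerate h i0).map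
            (fun p => p.2 ++ (if p.1 = n - 3 then "" else "\n"))),
          false, bl + h.length, bs⟩ := by
  induction h with
  | nil => intro i0 k r b bl bs; simp [PySem.List.enumerate_nil, strConcat]
  | cons x xs ih =>
    intro i0 k r b bl bs
    rw [PySem.List.enumerate_cons, List.foldl_cons]
    have hstep : stepA n ⟨k, r, b, false, bl, bs⟩ (i0, x)
        = ⟨k, r, b ++ (x ++ (if i0 = n - 3 then "" else "\n")), false, bl + 1, bs⟩ := by
      by_cases hc : i0 = n - 3 <;> simp [stepA, hc, String.append_assoc]
    rw [hstep, ih]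
    simp only [List.map_cons, strConcat_cons, StA.mk.injEq, String.append_assoc, List.length_cons,
      true_and, and_true]
    push_cast
    ring


lemma foldl_idx_enum_one {α β : Type} (L : List α) (d : α) (f : β → Int × α → β) (init : β) :
    (PySem.List.pyRange 1 (L.length : Int) 1).foldl
      (fun s i => f s (i, PySem.List.pyGetD L i d)) init
      = (PySem.List.enumerate (L.drop 1) 1).foldl f init := by
  simpa using foldl_idx_enum L d f 1 init

lemma main_eq (reply : String) : parseHeaderFromStr reply = parseHeaderFromStr_alt reply := by
  simp only [parseHeaderFromStr, parseHeaderFromStr_alt]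
  set L : List String := (PySem.Str.split? reply "\r\n").getD [] with hL
  rw [foldl_idx_enum_one L "" (stepA (L.length : Int)) ⟨"", PySem.Dict.empty, "", true, 0, 0⟩]
  cases hidx : PySem.List.index? (L.drop 1) "" with
  | none =>
    have hmem : "" ∉ L.drop 1 := (PySem.List.index?_eq_none_iff _ _).mp hidx
    have hne : ∀ x ∈ L.drop 1, x ≠ "" := fun x hx h => hmem (h ▸ hx)
    rw [headerFold (L.length : Int) (L.drop 1) hne 1 "" PySem.Dict.empty "" 0 0]
    have h1 : PySem.List.slice L (some (1 : Int)) (some (L.length : Int)) = L.drop 1 := by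
      have h := PySem.List.slice_natCast L 1 L.length
      simp only [Nat.cast_one] at h
      rw [h]
      exact List.take_of_length_le (by simp)
    have h2 : PySem.List.slice L (some ((L.length : Int) + 1)) none = ([] : List String) := by
      have h := PySem.List.slice_from_natCast L (L.length + 1)
      push_cast at h
      rw [h]
      exact List.drop_eq_nil_of_le (by omega)
    simp only [h1, h2]
    simp [join_empty, strConcat, PySem.List.pyRange_one_eq_nil]
  | some j =>
    obtain ⟨pre, suf, hT, hlen, hnpre⟩ := (PySem.List.index?_eq_some_iff _ _ _).mp hidx
    have hnpre' : ∀ x ∈ pre, x ≠ "" := fun x hx h => hnpre (h ▸ hx)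
    have hLlen : L.length = pre.length + suf.length + 2 := by
      have hne : L ≠ [] := by
        intro h
        rw [h] at hT
        exact absurd hT (by simp)
      have hd : (L.drop 1).length = L.length - 1 := by simp
      have h3 : 0 < L.length := List.length_pos_iff.mpr hne
      rw [hT] at hd
      simp at hd
      omega
    have henum : PySem.List.enumerate (pre ++ "" :: suf) 1
        = PySem.List.enumerate pre 1
          ++ ((1 + (pre.length : Int)), "") :: PySem.List.enumerate suf (1 + (pre.length : Int) + 1) := by
      rw [PySem.List.enumerate_append, PySem.List.enumerate_cons]
    have hstepE : stepA (L.length : Int)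
        ⟨(pre.foldl stepH ("", PySem.Dict.empty)).1, (pre.foldl stepH ("", PySem.Dict.empty)).2,
          "", true, 0, 0⟩ ((1 + (pre.length : Int)), "")
        = ⟨(pre.foldl stepH ("", PySem.Dict.empty)).1, (pre.foldl stepH ("", PySem.Dict.empty)).2,
            "", false, 0, 1 + (pre.length : Int) + 1⟩ := by
      simp [stepA]
    have hslice1 : PySem.List.slice L (some (1 : Int)) (some ((j : Int) + 1)) = pre := by
      have h := PySem.List.slice_natCast L 1 (j + 1)
      push_cast at h
      rw [h, hT]
      exact List.take_left' hlen
    have hslice2 : PySem.List.slice L (some ((j : Int) + 1 + 1)) none = suf := by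
      have h := PySem.List.slice_from_natCast L (j + 2)
      push_cast at h
      rw [show ((j : Int) + 1 + 1) = (j : Int) + 2 by ring, h,
        show j + 2 = 1 + (j + 1) by ring, ← List.drop_drop, hT,
        show pre ++ "" :: suf = (pre ++ [""]) ++ suf by simp]
      exact List.drop_left' (by simp [hlen])
    have hlist : (PySem.List.pyRange 0 ((suf.length : Nat) : Int) 1).map
          (fun i => PySem.List.pyGetD suf i "" ++ (if i = ((suf.length : Nat) : Int) - 3 then "" else "\n"))
        = (PySem.List.enumerate suf (1 + (pre.length : Int) + 1)).map
            (fun p => p.2 ++ (if p.1 = (L.length : Int) - 3 then "" else "\n")) := by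
      apply List.ext_getElem
      · simp [PySem.List.length_pyRange_one, PySem.List.length_enumerate]
      · intro m hm1 hm2
        have hm : m < suf.length := by
          simpa [PySem.List.length_pyRange_one] using hm1
        rw [List.getElem_map, List.getElem_map, PySem.List.getElem_pyRange_one,
          PySem.List.getElem_enumerate]
        have hz : (0 : Int) + (m : Int) = ((m : Nat) : Int) := by ring
        rw [hz, PySem.List.pyGetD_natCast, List.getD_eq_getElem suf "" hm]
        congr 1
        exact if_congr (by omega) rfl rfl
    rw [hT, henum, List.foldl_append,
      headerFold (L.length : Int) pre hnpre' 1 "" PySem.Dict.empty "" 0 0, List.foldl_cons,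
      hstepE, bodyFold (L.length : Int) suf (1 + (pre.length : Int) + 1)]
    simp [join_empty]
    refine ⟨by rw [hslice1], ?_, by rw [hslice2]⟩
    rw [hslice2, hlist]

-- ===== VERDICT (by name: the statement is the Claim_ definition above) =====
theorem parseHeaderFromStr_spec : Claim_equal_parseHeaderFromStr := by
  intro reply _ _
  unfold Spec_parseHeaderFromStr
  exact main_eq reply
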